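-- pv_equiv track=rewrite | github.com/TheDarkLightX/Formal_Methods_Philosophy | experiments/math_object_innovation_v73/run_cycle.py | minimal_profile
-- ===== SOURCE A (Python) =====
-- import itertools
--
-- def sig_from_int(x: int, width: int = 4) -> tuple[int, ...]:
--     return tuple((x >> idx) & 1 for idx in reversed(range(width)))
--
-- def minimal_profile(subset):
--     signatures = [sig_from_int(value) for value in subset]
--     masks = [
--         mask
--         for size in range(1, 5)
--         for mask in itertools.combinations(range(4), size)
--     ]
--     mins = []
--     for i, signature in enumerate(signatures):
--         others = [other for j, other in enumerate(signatures) if j != i]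
--         best = None
--         for coords in masks:
--             pattern = tuple(signature[idx] for idx in coords)
--             if all(tuple(other[idx] for idx in coords) != pattern for other in others):
--                 best = len(coords)
--                 break
--         if best is None:
--             raise RuntimeError("no unique-support witness found")
--         mins.append(best)
--     profile = tuple(sorted(mins))
--     return profile
-- ===== SOURCE B (Python) =====
-- import itertools
--
-- def minimal_profile(subset):
--     # One pass per coordinate subset (15 total): project every signature once,
--     # count projection multiplicities in a dict, and give each still-unassigned
--     # element whose projection is unique the current subset size.
--     sigs = [tuple((v >> idx) & 1 for idx in reversed(range(4))) for v in subset]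
--     best = [None] * len(sigs)
--     for size in range(1, 5):
--         for coords in itertools.combinations(range(4), size):
--             proj = [tuple(s[idx] for idx in coords) for s in sigs]
--             counts = {}
--             for p in proj:
--                 counts[p] = counts.get(p, 0) + 1
--             for i, p in enumerate(proj):
--                 if best[i] is None and counts[p] == 1:
--                     best[i] = size
--     if any(b is None for b in best):
--         raise RuntimeError("no unique-support witness found")
--     return tuple(sorted(best))
-- ===== Notes on version B (the rewrite author's own statement) =====
-- stated objective: alternative
-- what changed: Instead of A's per-element scan that re-compares the element's projected sub-tuple against every other signature (an O(n^2) inner pass repeated per coordinate subset), B makes one pass per coordinate subset: it projects all signatures once, tallies projection multiplicities in a dict, and assigns each still-unassigned element whose projection has count 1 the current subset size.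
import Mathlib
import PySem

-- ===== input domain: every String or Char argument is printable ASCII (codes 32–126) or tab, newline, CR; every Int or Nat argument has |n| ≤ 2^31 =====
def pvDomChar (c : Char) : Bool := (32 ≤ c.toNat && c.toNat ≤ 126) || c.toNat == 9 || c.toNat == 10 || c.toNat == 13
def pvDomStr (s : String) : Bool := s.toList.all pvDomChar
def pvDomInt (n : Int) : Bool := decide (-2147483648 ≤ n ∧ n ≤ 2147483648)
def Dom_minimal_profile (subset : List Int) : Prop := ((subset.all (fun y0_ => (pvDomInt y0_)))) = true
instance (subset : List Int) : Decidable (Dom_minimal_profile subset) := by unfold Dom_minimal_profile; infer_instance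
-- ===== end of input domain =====

-- B replaces A's per-element scan over all other signatures (O(n^2) pair comparisons per
-- coordinate subset) by one pass per coordinate subset that counts projection
-- multiplicities in a dict and assigns each still-unassigned element with a unique
-- projection the current subset size (objective: alternative decomposition).

-- [mask for size in range(1,5) for mask in itertools.combinations(range(4), size)]
-- (shared helper: both Pythons generate the same size-ordered combinations list)
def pvMasks : List (List Int) :=
  (PySem.List.pyRange 1 5 1).flatMap (fun size =>
    PySem.List.combinations ([0, 1, 2, 3] : List Int) size.toNat)

-- ===== PORT A =====
-- (x >> idx) & 1 for idx in reversed(range(4))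
def sig_from_int (x : Int) : List Int :=
  ((List.range 4).reverse).map (fun (idx : Nat) => PySem.Int.band (x >>> idx) 1)

def minimal_profile (subset : List Int) : List Int :=
  let signatures := subset.map (fun value => sig_from_int value)
  let bests := (PySem.List.enumerate signatures).map (fun p =>
    let others := ((PySem.List.enumerate signatures).filter (fun q => q.1 != p.1)).map (·.2)
    (pvMasks.find? (fun coords =>
      others.all (fun other =>
        decide (coords.map (fun idx => PySem.List.pyGet? other idx)
                ≠ coords.map (fun idx => PySem.List.pyGet? p.2 idx))))).map
      (fun coords => (coords.length : Int)))
  if bests.all (·.isSome) then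
    PySem.List.sorted (bests.map (fun o => o.getD 0)) (fun v => v) false
  else []  -- Python raises RuntimeError here (excluded by Pre_)

-- ===== PORT B =====
-- one inner pass of Source B for a fixed coords: project all signatures, count the
-- projections in a dict, then give unassigned elements with count 1 the subset size
def pvStep (sigs : List (List Int)) (best : List (Option Int)) (coords : List Int) :
    List (Option Int) :=
  let proj := sigs.map (fun s => coords.map (fun idx => PySem.List.pyGet? s idx))
  let counts := proj.foldl
    (fun d p => PySem.Dict.insert d p (PySem.Dict.getD d p 0 + 1))
    (PySem.Dict.empty : PySem.Dict (List (Option Int)) Int)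
  (best.zip proj).map (fun bp =>
    match bp.1 with
    | some v => some v
    | none => if PySem.Dict.getD counts bp.2 0 == 1 then some (coords.length : Int) else none)

def minimal_profile_alt (subset : List Int) : List Int :=
  let sigs := subset.map (fun (v : Int) =>
    ((List.range 4).reverse).map (fun (idx : Nat) => PySem.Int.band (v >>> idx) 1))
  let best := pvMasks.foldl (pvStep sigs) (sigs.map (fun _ => (none : Option Int)))
  if best.any (·.isNone) then []  -- Python raises RuntimeError here (excluded by Pre_)
  else PySem.List.sorted (best.map (fun o => o.getD 0)) (fun v => v) false

-- ===== PRECONDITION & SPEC =====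
-- Pre_ excludes inputs containing two values congruent mod 16 (equal 4-bit signatures):
-- on exactly those inputs both A and B raise RuntimeError.
def Pre_minimal_profile (subset : List Int) : Prop :=
  List.Pairwise (fun a b => PySem.Int.mod a 16 ≠ PySem.Int.mod b 16) subset
instance (subset : List Int) : Decidable (Pre_minimal_profile subset) := by
  unfold Pre_minimal_profile; infer_instance

def pvWitness_minimal_profile : List Int := [0, 1, 3, 7]

def Spec_minimal_profile (subset : List Int) (out : List Int) : Prop := out = minimal_profile_alt subset
instance (subset : List Int) (out : List Int) : Decidable (Spec_minimal_profile subset out) := by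
  unfold Spec_minimal_profile; infer_instance

-- ===== CLAIM (what is proved, stated in full; the proofs are below) =====
def Claim_equal_minimal_profile : Prop := ∀ (subset : List Int), Dom_minimal_profile subset → Pre_minimal_profile subset → Spec_minimal_profile subset (minimal_profile subset)

-- ===== LEMMAS AND PROOFS =====

-- the projection of signature s on coordinate subset c
def pvProj (c s : List Int) : List (Option Int) :=
  c.map (fun idx => PySem.List.pyGet? s idx)

-- "the projection of s on c is unique among all projections" (B's counter test)
def pvUq (sigs : List (List Int)) (c s : List Int) : Bool :=
  (sigs.map (pvProj c)).count (pvProj c s) == 1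

-- the value B's fold leaves at an entry: keep an assigned size, else first matching mask
def pvG (sigs : List (List Int)) (ms : List (List Int)) (b : Option Int) (s : List Int) :
    Option Int :=
  match b with
  | some v => some v
  | none => (ms.find? (fun c => pvUq sigs c s)).map (fun c => (c.length : Int))

theorem pvStep_eq (sigs : List (List Int)) (best : List (Option Int)) (c : List Int) :
    pvStep sigs best c = List.zipWith (fun b s =>
      match b with
      | some v => some v
      | none => if pvUq sigs c s then some (c.length : Int) else none) best sigs := by
  simp only [pvStep]
  rw [show (fun (s : List Int) => c.map (fun idx => PySem.List.pyGet? s idx)) = pvProj c from rfl]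
  rw [List.zip_map_right, List.map_map]
  rw [List.zip, List.map_zipWith]
  congr 1
  funext b s
  cases b with
  | some v => rfl
  | none =>
    have h0 : PySem.Dict.getD (PySem.Dict.empty : PySem.Dict (List (Option Int)) Int) (pvProj c s) 0 = 0 := rfl
    simp only [Function.comp, Prod.map, id_eq, PySem.Dict.getD_foldl_insert_add_one, h0,
      zero_add, pvUq, beq_iff_eq, Nat.cast_eq_one]

theorem zipWith_left {α β : Type} (l : List α) (l' : List β) (h : l.length = l'.length) :
    List.zipWith (fun a _ => a) l l' = l := by
  induction l generalizing l' with
  | nil => rfl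
  | cons a t ih => cases l' with
    | nil => simp at h
    | cons b t' => simp_all

theorem zipWith_zipWith {α β : Type} (g f : α → β → α) (l1 : List α) (l2 : List β) :
    List.zipWith g (List.zipWith f l1 l2) l2 = List.zipWith (fun a b => g (f a b) b) l1 l2 := by
  induction l1 generalizing l2 with
  | nil => rfl
  | cons a t ih => cases l2 <;> simp_all

theorem fold_inv (sigs : List (List Int)) :
    ∀ (ms : List (List Int)) (best : List (Option Int)), best.length = sigs.length →
      ms.foldl (pvStep sigs) best = List.zipWith (pvG sigs ms) best sigs := by
  intro ms
  induction ms with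
  | nil =>
    intro best h
    have : pvG sigs [] = fun b _ => b := by
      funext b s; cases b <;> rfl
    simpa [this] using (zipWith_left best sigs h).symm
  | cons c ms ih =>
    intro best h
    have hlen : (pvStep sigs best c).length = sigs.length := by
      rw [pvStep_eq, List.length_zipWith, h, min_self]
    calc (c :: ms).foldl (pvStep sigs) best
        = ms.foldl (pvStep sigs) (pvStep sigs best c) := rfl
      _ = List.zipWith (pvG sigs ms) (pvStep sigs best c) sigs := ih _ hlen
      _ = List.zipWith (pvG sigs (c :: ms)) best sigs := by
          rw [pvStep_eq, zipWith_zipWith]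
          congr 1
          funext b s
          cases b with
          | some v => rfl
          | none =>
            cases huq : pvUq sigs c s <;> simp [pvG, List.find?, huq]

theorem perm_split {α : Type} :
    ∀ (xs : List α) (s i : Int) (x : α), (i, x) ∈ PySem.List.enumerate xs s →
      xs.Perm (x :: ((PySem.List.enumerate xs s).filter (fun q => q.1 != i)).map (·.2)) := by
  intro xs
  induction xs with
  | nil => intro s i x h; simp [PySem.List.enumerate] at h
  | cons a t ih =>
    intro s i x h
    have htail : ∀ q ∈ PySem.List.enumerate t (s + 1), s + 1 ≤ q.1 := by
      intro q hq
      rw [PySem.List.mem_enumerate_iff] at hq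
      obtain ⟨k, hk, rfl⟩ := hq
      omega
    rw [PySem.List.enumerate_cons] at h ⊢
    rcases List.mem_cons.mp h with heq | hmem
    · injection heq with hi hx
      subst hi; subst hx
      have hfil : ((i, x) :: PySem.List.enumerate t (i + 1)).filter (fun q => q.1 != i) =
          PySem.List.enumerate t (i + 1) := by
        rw [List.filter_cons]
        simp only [show (((i, x) : Int × α).1 != i) = false by simp]
        apply List.filter_eq_self.mpr
        intro q hq
        have := htail q hq
        simp only [bne_iff_ne]
        omega
      rw [hfil, PySem.List.map_snd_enumerate]
    · have hik : s + 1 ≤ i := by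
        rw [PySem.List.mem_enumerate_iff] at hmem
        obtain ⟨k, hk, hkk⟩ := hmem
        injection hkk with h1 _
        omega
      have hfil : ((s, a) :: PySem.List.enumerate t (s + 1)).filter (fun q => q.1 != i) =
          (s, a) :: (PySem.List.enumerate t (s + 1)).filter (fun q => q.1 != i) := by
        rw [List.filter_cons]
        simp only [show (((s, a) : Int × α).1 != i) = true by
          simp only [bne_iff_ne]; intro hc; omega]
        simp
      rw [hfil, List.map_cons]
      have hih := ih (s + 1) i x hmem
      exact (List.Perm.cons a hih).trans (List.Perm.swap x a _)

theorem pred_eq (sigs : List (List Int)) (p : Int × List Int)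
    (hp : p ∈ PySem.List.enumerate sigs 0) (c : List Int) :
    (((PySem.List.enumerate sigs 0).filter (fun q => q.1 != p.1)).map (·.2)).all
      (fun other => decide (pvProj c other ≠ pvProj c p.2)) = pvUq sigs c p.2 := by
  obtain ⟨i, x⟩ := p
  have hperm := perm_split sigs 0 i x hp
  set others := ((PySem.List.enumerate sigs 0).filter (fun q => q.1 != i)).map (·.2) with ho
  have hcnt : (sigs.map (pvProj c)).count (pvProj c x) =
      (others.map (pvProj c)).count (pvProj c x) + 1 := by
    rw [(hperm.map (pvProj c)).count_eq]
    simp [List.count_cons_self]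
  rw [Bool.eq_iff_iff]
  simp only [pvUq, List.all_eq_true, decide_eq_true_eq, beq_iff_eq, hcnt]
  constructor
  · intro h
    have : (others.map (pvProj c)).count (pvProj c x) = 0 := by
      rw [List.count_eq_zero]
      intro hmem
      obtain ⟨o, hom, hoe⟩ := List.mem_map.mp hmem
      exact h o hom hoe
    omega
  · intro h o hom hoe
    have h0 : (others.map (pvProj c)).count (pvProj c x) = 0 := by omega
    rw [List.count_eq_zero] at h0
    exact h0 (List.mem_map.mpr ⟨o, hom, hoe⟩)

theorem all_isSome_eq (l : List (Option Int)) : l.all (·.isSome) = !l.any (·.isNone) := by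
  induction l with
  | nil => rfl
  | cons a t ih => cases a <;> simp_all

theorem main_eq (subset : List Int) :
    minimal_profile subset = minimal_profile_alt subset := by
  simp only [minimal_profile, minimal_profile_alt]
  set S := subset.map (fun value => sig_from_int value) with hS
  have hbest : pvMasks.foldl (pvStep S) (S.map fun _ => (none : Option Int))
      = S.map (fun s => pvG S pvMasks none s) := by
    rw [fold_inv S pvMasks (S.map fun _ => none) (by simp)]
    rw [List.zipWith_map_left, List.zipWith_self]
  have hmap : ∀ (g : List Int → Option Int),
      S.map g = (PySem.List.enumerate S 0).map (fun p => g p.2) := by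
    intro g
    conv_lhs => rw [← PySem.List.map_snd_enumerate S 0]
    rw [List.map_map]
    rfl
  have hlists : (PySem.List.enumerate S 0).map (fun p =>
      (pvMasks.find? (fun coords =>
        ((((PySem.List.enumerate S 0).filter (fun q => q.1 != p.1)).map (·.2)).all
          (fun other =>
            decide (coords.map (fun idx => PySem.List.pyGet? other idx)
                    ≠ coords.map (fun idx => PySem.List.pyGet? p.2 idx)))))).map
        (fun coords => (coords.length : Int)))
      = pvMasks.foldl (pvStep S) (S.map fun _ => (none : Option Int)) := by
    rw [hbest, hmap]
    apply List.map_congr_left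
    intro p hp
    have hpred : (fun coords =>
        ((((PySem.List.enumerate S 0).filter (fun q => q.1 != p.1)).map (·.2)).all
          (fun other =>
            decide (coords.map (fun idx => PySem.List.pyGet? other idx)
                    ≠ coords.map (fun idx => PySem.List.pyGet? p.2 idx)))))
        = fun coords => pvUq S coords p.2 := by
      funext c
      exact pred_eq S p hp c
    rw [hpred]
    rfl
  rw [hlists]
  have hSB : (subset.map (fun (v : Int) =>
      ((List.range 4).reverse).map (fun (idx : Nat) => PySem.Int.band (v >>> idx) 1))) = S := rfl
  rw [hSB]
  set E := pvMasks.foldl (pvStep S) (S.map fun _ => (none : Option Int)) with hE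
  rw [all_isSome_eq]
  cases h : E.any (·.isNone) <;> rfl
-- ===== VERDICT (by name: the statement is the Claim_ definition above) =====
theorem minimal_profile_spec : Claim_equal_minimal_profile := by
  intro subset _ _
  exact main_eq subset
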